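-- pv_equiv track=rewrite | github.com/kKar1503/cs202-rcpsp-solver | bnb_solver.py | _all_maximal_feasible_subsets
-- ===== SOURCE A (Python) =====
-- def _all_maximal_feasible_subsets(
--     eligible: list[int], demands: list[list[int]], cap_remaining: list[int]
-- ) -> list[list[int]]:
--     """Enumerate every maximal subset of `eligible` that fits in `cap_remaining`.
--
--     For small eligible sets (|E| ≤ ~16) this is cheap; we use a recursive approach
--     and prune the moment a partial sum exceeds any capacity. We return only the
--     maximal fits (no proper subset dominates) to cut the branching factor.
--     """
--     R = len(cap_remaining)
--     results: list[list[int]] = []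
--
--     def recurse(idx: int, current: list[int], used: list[int]) -> None:
--         added_any = False
--         for j in range(idx, len(eligible)):
--             job = eligible[j]
--             fits = True
--             new_used = used[:]
--             for k in range(R):
--                 new_used[k] += demands[job][k]
--                 if new_used[k] > cap_remaining[k]:
--                     fits = False
--                     break
--             if not fits:
--                 continue
--             added_any = True
--             recurse(j + 1, current + [job], new_used)
--         if not added_any and current:
--             results.append(current)
--
--     recurse(0, [], [0] * R)
--     # Always include the "take nothing" option so the caller can model the delay branch.
--     if not results:
--         results.append([])
--     return results
-- ===== SOURCE B (Python) =====
-- def _all_maximal_feasible_subsets(eligible, demands, cap_remaining):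
--     """Pure functional decomposition: a recursive solver that RETURNS the list of
--     maximal completions (no shared mutable results list), with the feasibility
--     test done by a short-circuiting all() and the new usage vector built by a
--     comprehension (no element-wise mutation with break)."""
--     R = len(cap_remaining)
--     n = len(eligible)
--
--     def solve(idx, current, used):
--         out = []
--         for j in range(idx, n):
--             if all(used[k] + demands[eligible[j]][k] <= cap_remaining[k]
--                    for k in range(R)):
--                 out += solve(j + 1, current + [eligible[j]],
--                              [used[k] + demands[eligible[j]][k] for k in range(R)])
--         if not out and current:
--             return [current]
--         return out
--
--     results = solve(0, [], [0] * R)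
--     return results if results else [[]]
-- ===== Notes on version B (the rewrite author's own statement) =====
-- stated objective: alternative
-- what changed: The DFS mutating a shared results list and an element-wise fits loop with break is replaced by a pure recursive solver that returns and concatenates result lists, with feasibility tested by a short-circuiting all() and the new usage vector built by a comprehension.
-- outside the precondition, e.g. on _all_maximal_feasible_subsets([2], [], []): A returns [[2]], B returns [[2]]; on _all_maximal_feasible_subsets([0], [[5]], [0, 0]): A returns [[]], B returns [[]]
import Mathlib
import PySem

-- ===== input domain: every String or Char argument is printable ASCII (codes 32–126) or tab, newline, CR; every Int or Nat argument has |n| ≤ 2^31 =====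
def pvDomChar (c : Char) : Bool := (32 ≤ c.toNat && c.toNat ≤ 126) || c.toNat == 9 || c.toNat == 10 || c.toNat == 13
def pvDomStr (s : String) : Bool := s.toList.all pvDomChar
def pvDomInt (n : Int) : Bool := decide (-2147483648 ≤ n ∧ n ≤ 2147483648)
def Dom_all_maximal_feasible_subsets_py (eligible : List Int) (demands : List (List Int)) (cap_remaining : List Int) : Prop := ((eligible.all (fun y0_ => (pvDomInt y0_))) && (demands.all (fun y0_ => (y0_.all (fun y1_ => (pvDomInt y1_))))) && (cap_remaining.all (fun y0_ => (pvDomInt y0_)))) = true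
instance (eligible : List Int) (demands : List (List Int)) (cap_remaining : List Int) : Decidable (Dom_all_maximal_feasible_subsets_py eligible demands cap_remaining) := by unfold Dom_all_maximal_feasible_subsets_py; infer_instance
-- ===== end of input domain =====

-- B replaces A's DFS with a shared mutable results list and a mutating fits loop (break on
-- overflow) by a pure recursive solver that returns and concatenates result lists, testing
-- feasibility with one all() over the row; same output, alternative decomposition.

-- ===== PORT A =====
-- inner `for k in range(R)` loop of A: new_used[k] += demands[job][k]; break on overflow.
-- Iterated with remaining count n (initially R = cap.length), current index k; returns (fits, new_used).
def pvFitsA (row cap : List Int) : Nat → Nat → List Int → Bool × List Int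
  | 0, _, used => (true, used)
  | n+1, k, used =>
    if (used.set k (used.getD k 0 + row.getD k 0)).getD k 0 > cap.getD k 0 then
      (false, used.set k (used.getD k 0 + row.getD k 0))
    else pvFitsA row cap n (k+1) (used.set k (used.getD k 0 + row.getD k 0))

-- A's `recurse`: the `for j in range(idx, len(eligible))` loop is the j-recursion; a fitting j
-- first descends (fresh loop at j+1, added_any=false) appending into res, then the loop continues
-- with added_any=true; at loop end the leaf check appends `current`.  `demands[job]` is pyGet?
-- (possibly negative job), valid under Pre_.
def pvRecA (eligible : List Int) (demands : List (List Int)) (cap : List Int)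
    (j : Nat) (cur used : List Int) (added : Bool) (res : List (List Int)) : List (List Int) :=
  if h : j < eligible.length then
    if (pvFitsA ((PySem.List.pyGet? demands (eligible.getD j 0)).getD []) cap cap.length 0 used).1 then
      pvRecA eligible demands cap (j+1) cur used true
        (pvRecA eligible demands cap (j+1) (cur ++ [eligible.getD j 0])
          (pvFitsA ((PySem.List.pyGet? demands (eligible.getD j 0)).getD []) cap cap.length 0 used).2 false res)
    else pvRecA eligible demands cap (j+1) cur used added res
  else if added = false ∧ cur ≠ [] then res ++ [cur] else res
termination_by eligible.length - j
decreasing_by all_goals omega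

def all_maximal_feasible_subsets_py (eligible : List Int) (demands : List (List Int)) (cap_remaining : List Int) : List (List Int) :=
  let results := pvRecA eligible demands cap_remaining 0 [] (List.replicate cap_remaining.length 0) false []
  if results.isEmpty then [[]] else results

-- ===== PORT B =====
-- Source B's `all(used[k] + row[k] <= cap_remaining[k] for k in range(R))`
def pvFitsB (used row cap : List Int) : Bool :=
  (List.range cap.length).all (fun k => used.getD k 0 + row.getD k 0 ≤ cap.getD k 0)

-- Source B's `[used[k] + row[k] for k in range(R)]`
def pvNewUsedB (used row cap : List Int) : List Int :=
  (List.range cap.length).map (fun k => used.getD k 0 + row.getD k 0)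

mutual
-- Source B's `solve`: build `out`, then the `if not out and current` return
def pvSolveB (eligible : List Int) (demands : List (List Int)) (cap : List Int)
    (j : Nat) (cur used : List Int) : List (List Int) :=
  let out := pvLoopB eligible demands cap j cur used
  if out = [] ∧ cur ≠ [] then [cur] else out
termination_by (eligible.length - j, 1)

-- Source B's `for j in range(idx, n)` loop accumulating `out +=`
def pvLoopB (eligible : List Int) (demands : List (List Int)) (cap : List Int)
    (j : Nat) (cur used : List Int) : List (List Int) :=
  if h : j < eligible.length then
    let row := (PySem.List.pyGet? demands (eligible.getD j 0)).getD []
    if pvFitsB used row cap then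
      pvSolveB eligible demands cap (j+1) (cur ++ [eligible.getD j 0]) (pvNewUsedB used row cap)
        ++ pvLoopB eligible demands cap (j+1) cur used
    else pvLoopB eligible demands cap (j+1) cur used
  else []
termination_by (eligible.length - j, 0)
decreasing_by all_goals omega
end

def all_maximal_feasible_subsets_py_alt (eligible : List Int) (demands : List (List Int)) (cap_remaining : List Int) : List (List Int) :=
  let results := pvSolveB eligible demands cap_remaining 0 [] (List.replicate cap_remaining.length 0)
  if results.isEmpty then [[]] else results

-- ===== PRECONDITION & SPEC =====
-- Pre_ excludes inputs on which some eligible job is not a valid (possibly negative) Python index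
-- into demands, or its demand row is shorter than cap_remaining: on those inputs A (and B, whose
-- all()/indexing short-circuits in the same order) raises IndexError unless an earlier capacity
-- check breaks first or R = 0, so this is a slight over-approximation of the raising set (see the
-- cited examples, where both programs still return the same value).
def Pre_all_maximal_feasible_subsets_py (eligible : List Int) (demands : List (List Int)) (cap_remaining : List Int) : Prop :=
  ∀ job ∈ eligible, PySem.Raise.InRange demands.length job ∧
    cap_remaining.length ≤ ((PySem.List.pyGet? demands job).getD []).length
instance (eligible : List Int) (demands : List (List Int)) (cap_remaining : List Int) : Decidable (Pre_all_maximal_feasible_subsets_py eligible demands cap_remaining) := by unfold Pre_all_maximal_feasible_subsets_py; infer_instance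

def pvWitness_all_maximal_feasible_subsets_py : List Int × List (List Int) × List Int :=
  ([0, 1], [[1, 2], [2, 1]], [3, 3])

def Spec_all_maximal_feasible_subsets_py (eligible : List Int) (demands : List (List Int)) (cap_remaining : List Int) (out : List (List Int)) : Prop := out = all_maximal_feasible_subsets_py_alt eligible demands cap_remaining
instance (eligible : List Int) (demands : List (List Int)) (cap_remaining : List Int) (out : List (List Int)) : Decidable (Spec_all_maximal_feasible_subsets_py eligible demands cap_remaining out) := by unfold Spec_all_maximal_feasible_subsets_py; infer_instance

-- ===== CLAIM (what is proved, stated in full; the proofs are below) =====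
def Claim_equal_all_maximal_feasible_subsets_py : Prop := ∀ (eligible : List Int) (demands : List (List Int)) (cap_remaining : List Int), Dom_all_maximal_feasible_subsets_py eligible demands cap_remaining → Pre_all_maximal_feasible_subsets_py eligible demands cap_remaining → Spec_all_maximal_feasible_subsets_py eligible demands cap_remaining (all_maximal_feasible_subsets_py eligible demands cap_remaining)

-- ===== LEMMAS AND PROOFS =====

theorem pvFitsA_fst (row cap : List Int) (n k : Nat) (used : List Int)
    (hlen : used.length = cap.length) (hk : k + n = cap.length) :
    (pvFitsA row cap n k used).1
      = (List.range' k n).all (fun i => used.getD i 0 + row.getD i 0 ≤ cap.getD i 0) := by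
  induction n generalizing k used with
  | zero => simp [pvFitsA]
  | succ n ih =>
    have hk' : k < used.length := by omega
    have hget : (used.set k (used.getD k 0 + row.getD k 0)).getD k 0
        = used.getD k 0 + row.getD k 0 := by
      simp [List.getD, List.getElem?_set_self hk']
    have hne : ∀ i, i ≠ k →
        (used.set k (used.getD k 0 + row.getD k 0)).getD i 0 = used.getD i 0 := by
      intro i hi; simp [List.getD, List.getElem?_set_ne (Ne.symm hi)]
    rw [pvFitsA, List.range'_succ, List.all_cons]
    by_cases hcond : used.getD k 0 + row.getD k 0 ≤ cap.getD k 0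
    · rw [if_neg (by rw [hget]; omega),
        ih (k+1) _ (by simpa using hlen) (by omega)]
      have hall : (List.range' (k+1) n).all
            (fun i => decide ((used.set k (used.getD k 0 + row.getD k 0)).getD i 0
              + row.getD i 0 ≤ cap.getD i 0))
          = (List.range' (k+1) n).all
            (fun i => decide (used.getD i 0 + row.getD i 0 ≤ cap.getD i 0)) := by
      -- the two predicates agree on every element of range' (k+1) n (all are ≠ k)
        rw [Bool.eq_iff_iff]
        simp only [List.all_eq_true]
        constructor <;>
          · intro h i hi
            have hik : i ≠ k := by
              have := List.mem_range'_1.mp hi; omega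
            have := h i hi
            simp only [hne i hik] at this ⊢
            exact this
      rw [hall, decide_eq_true hcond, Bool.true_and]
    · rw [if_pos (by rw [hget]; omega), decide_eq_false hcond, Bool.false_and]

theorem pvFitsA_snd (row cap : List Int) (n k : Nat) (used : List Int)
    (hlen : used.length = cap.length) (hk : k + n = cap.length)
    (hfit : (pvFitsA row cap n k used).1 = true) :
    (pvFitsA row cap n k used).2
      = used.take k ++ (List.range' k n).map (fun i => used.getD i 0 + row.getD i 0) := by
  induction n generalizing k used with
  | zero =>
    have : k = used.length := by omega
    simp [pvFitsA, this]
  | succ n ih =>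
    have hk' : k < used.length := by omega
    have hget : (used.set k (used.getD k 0 + row.getD k 0)).getD k 0
        = used.getD k 0 + row.getD k 0 := by
      simp [List.getD, List.getElem?_set_self hk']
    have hne : ∀ i, i ≠ k →
        (used.set k (used.getD k 0 + row.getD k 0)).getD i 0 = used.getD i 0 := by
      intro i hi; simp [List.getD, List.getElem?_set_ne (Ne.symm hi)]
    by_cases hcond : used.getD k 0 + row.getD k 0 ≤ cap.getD k 0
    · rw [pvFitsA, if_neg (by rw [hget]; omega)] at hfit ⊢
      rw [ih (k+1) _ (by simpa using hlen) (by omega) hfit]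
      have htake : (used.set k (used.getD k 0 + row.getD k 0)).take (k+1)
          = used.take k ++ [used.getD k 0 + row.getD k 0] := by
        rw [List.take_set, List.take_add_one]
        have h1 : used[k]? = some used[k] := List.getElem?_eq_getElem hk'
        rw [h1, Option.toList_some]
        have h2 : (used.take k).length = k := by simp; omega
        rw [List.set_append, if_neg (by omega), h2]
        simp
      have hmap : (List.range' (k+1) n).map
            (fun i => (used.set k (used.getD k 0 + row.getD k 0)).getD i 0 + row.getD i 0)
          = (List.range' (k+1) n).map (fun i => used.getD i 0 + row.getD i 0) := by
        apply List.map_congr_left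
        intro i hi
        have hik : i ≠ k := by
          have := List.mem_range'_1.mp hi; omega
        rw [hne i hik]
      rw [hmap, htake, List.range'_succ, List.map_cons]
      simp
    · rw [pvFitsA, if_pos (by rw [hget]; omega)] at hfit
      simp at hfit

theorem pvSolveB_ne_nil (eligible : List Int) (demands : List (List Int)) (cap : List Int)
    (j : Nat) (cur used : List Int) (hcur : cur ≠ []) :
    pvSolveB eligible demands cap j cur used ≠ [] := by
  rw [pvSolveB]
  by_cases h : pvLoopB eligible demands cap j cur used = [] ∧ cur ≠ []
  · simp [h]
  · rw [if_neg h]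
    intro hc
    exact h ⟨hc, hcur⟩

theorem pvAB (eligible : List Int) (demands : List (List Int)) (cap : List Int)
    (j : Nat) (cur used : List Int) (added : Bool) (res : List (List Int))
    (hlen : used.length = cap.length) :
    pvRecA eligible demands cap j cur used added res
      = res ++ pvLoopB eligible demands cap j cur used
          ++ (if added = false ∧ pvLoopB eligible demands cap j cur used = [] ∧ cur ≠ []
              then [cur] else []) := by
  generalize hn : eligible.length - j = n
  induction n generalizing j cur used added res with
  | zero =>
    have hj : ¬ j < eligible.length := by omega
    rw [pvRecA, dif_neg hj, pvLoopB, dif_neg hj]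
    split_ifs <;> simp_all
  | succ n ih =>
    have hj : j < eligible.length := by omega
    have h1 : eligible.length - (j+1) = n := by omega
    rw [pvRecA, dif_pos hj, pvLoopB, dif_pos hj]
    simp only []
    rw [pvFitsA_fst _ _ _ _ _ hlen (by omega)]
    have hrange : List.range' 0 cap.length = List.range cap.length :=
      List.range_eq_range'.symm
    by_cases hf : pvFitsB used ((PySem.List.pyGet? demands (eligible.getD j 0)).getD []) cap = true
    · rw [if_pos (by rw [hrange]; exact hf), if_pos hf]
      have hsnd := pvFitsA_snd ((PySem.List.pyGet? demands (eligible.getD j 0)).getD []) cap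
        cap.length 0 used hlen (by omega)
        (by rw [pvFitsA_fst _ _ _ _ _ hlen (by omega), hrange]; exact hf)
      have hused' : (pvFitsA ((PySem.List.pyGet? demands (eligible.getD j 0)).getD []) cap
            cap.length 0 used).2
          = pvNewUsedB used ((PySem.List.pyGet? demands (eligible.getD j 0)).getD []) cap := by
        rw [hsnd, pvNewUsedB, ← hrange]
        simp
      have hlen' : (pvFitsA ((PySem.List.pyGet? demands (eligible.getD j 0)).getD []) cap
            cap.length 0 used).2.length = cap.length := by
        rw [hused', pvNewUsedB]; simp
      rw [ih (j+1) (cur ++ [eligible.getD j 0]) _ false res hlen' h1]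
      rw [ih (j+1) cur used true _ hlen h1]
      have hinner : res ++ pvLoopB eligible demands cap (j+1) (cur ++ [eligible.getD j 0])
            (pvFitsA ((PySem.List.pyGet? demands (eligible.getD j 0)).getD []) cap cap.length 0 used).2
          ++ (if false = false ∧ pvLoopB eligible demands cap (j+1) (cur ++ [eligible.getD j 0])
                (pvFitsA ((PySem.List.pyGet? demands (eligible.getD j 0)).getD []) cap cap.length 0 used).2 = []
              ∧ cur ++ [eligible.getD j 0] ≠ [] then [cur ++ [eligible.getD j 0]] else [])
          = res ++ pvSolveB eligible demands cap (j+1) (cur ++ [eligible.getD j 0])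
              (pvNewUsedB used ((PySem.List.pyGet? demands (eligible.getD j 0)).getD []) cap) := by
        rw [hused', pvSolveB]
        by_cases hout : pvLoopB eligible demands cap (j+1) (cur ++ [eligible.getD j 0])
            (pvNewUsedB used ((PySem.List.pyGet? demands (eligible.getD j 0)).getD []) cap) = []
        · rw [if_pos ⟨rfl, hout, by simp⟩, if_pos ⟨hout, by simp⟩, hout]; simp
        · rw [if_neg (fun h => hout h.2.1), if_neg (fun h => hout h.1)]; simp
      rw [hinner]
      have hsne := pvSolveB_ne_nil eligible demands cap (j+1) (cur ++ [eligible.getD j 0])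
        (pvNewUsedB used ((PySem.List.pyGet? demands (eligible.getD j 0)).getD []) cap) (by simp)
      have hloopne : pvSolveB eligible demands cap (j+1) (cur ++ [eligible.getD j 0])
            (pvNewUsedB used ((PySem.List.pyGet? demands (eligible.getD j 0)).getD []) cap)
          ++ pvLoopB eligible demands cap (j+1) cur used ≠ [] := by
        intro h
        exact hsne (List.append_eq_nil_iff.mp h).1
      rw [if_neg (fun h => Bool.noConfusion h.1),
        if_neg (fun h => hloopne h.2.1)]
      simp
    · rw [if_neg (by rw [hrange]; exact hf), if_neg hf]
      exact ih j.succ cur used added res hlen h1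

-- ===== VERDICT (by name: the statement is the Claim_ definition above) =====
theorem all_maximal_feasible_subsets_py_spec : Claim_equal_all_maximal_feasible_subsets_py := by
  intro eligible demands cap _ _
  unfold Spec_all_maximal_feasible_subsets_py
  unfold all_maximal_feasible_subsets_py all_maximal_feasible_subsets_py_alt
  rw [pvAB eligible demands cap 0 [] _ false [] (by simp)]
  rw [pvSolveB]
  simp
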